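-- pv_equiv track=rewrite | github.com/Fin-tan/smart-contract-Obfuscation | biAn-clone/src/obfuscator/layout/format_scrambler.py | split_strings
-- ===== SOURCE A (Python) =====
-- from typing import List, Tuple
--
-- def split_strings(src: str) -> List[Tuple[bool, str]]:
--     """
--     Returns list of tuples (is_string, text_segment)
--     is_string True means this segment is a quoted string (keep intact)
--     is_string False means segment outside strings (we will process)
--     Handles single-quote and double-quote strings and escaped quotes.
--     """
--     i = 0
--     n = len(src)
--     parts = []
--     while i < n:
--         if src[i] in ("'", '"'):
--             quote = src[i]
--             start = i
--             i += 1
--             while i < n: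
--                 if src[i] == '\\':
--                     # escape sequence, skip next char too
--                     i += 2
--                 elif src[i] == quote:
--                     i += 1
--                     break
--                 else:
--                     i += 1
--             parts.append((True, src[start:i]))
--         else:
--             start = i
--             while i < n and src[i] not in ("'", '"'):
--                 i += 1
--             parts.append((False, src[start:i]))
--     return parts
-- ===== SOURCE B (Python) =====
-- from typing import List, Tuple
--
-- def split_strings(src: str) -> List[Tuple[bool, str]]:
--     """Single flat state-machine pass: state 0 = outside, 1 = in string, 2 = escaped."""
--     parts = []
--     buf = []
--     state = 0
--     quote = ''
--     for ch in src:
--         if state == 0: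
--             if ch in ("'", '"'):
--                 if buf:
--                     parts.append((False, ''.join(buf)))
--                     buf = []
--                 quote = ch
--                 buf.append(ch)
--                 state = 1
--             else:
--                 buf.append(ch)
--         elif state == 1:
--             buf.append(ch)
--             if ch == '\\':
--                 state = 2
--             elif ch == quote:
--                 parts.append((True, ''.join(buf)))
--                 buf = []
--                 state = 0
--         else:
--             buf.append(ch)
--             state = 1
--     if buf:
--         parts.append((state != 0, ''.join(buf)))
--     return parts
-- ===== Notes on version B (the rewrite author's own statement) =====
-- stated objective: alternative
-- what changed: Replaced A's outer loop with nested index-scanning while-loops and slice extraction by a single flat character-by-character state machine (outside / in-string / escaped) that accumulates each segment in a buffer and flushes it at segment boundaries and at end of input.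
import Mathlib
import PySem

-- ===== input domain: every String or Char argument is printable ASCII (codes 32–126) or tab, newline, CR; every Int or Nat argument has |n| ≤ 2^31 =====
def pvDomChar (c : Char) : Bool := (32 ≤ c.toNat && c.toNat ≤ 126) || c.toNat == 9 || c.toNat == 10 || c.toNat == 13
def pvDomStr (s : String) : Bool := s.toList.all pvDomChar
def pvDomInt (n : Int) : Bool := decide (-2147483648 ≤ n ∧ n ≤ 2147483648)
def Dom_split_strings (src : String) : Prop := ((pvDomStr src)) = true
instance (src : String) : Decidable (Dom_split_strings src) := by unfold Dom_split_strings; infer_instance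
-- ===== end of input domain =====

-- B replaces A's nested index/slice loops by one flat char-by-char state machine (outside / in-string / escaped) with a segment buffer; objective: alternative decomposition, same O(n) cost.

-- ===== PORT A =====
-- A's loops are index-driven; the fuel argument (always more than the remaining
-- scan length) is only a structural-recursion totality guard, never exhausted.
-- A's inner while loop: scan past a string body (escape skips 2, closing quote stops after it).
def innerA (l : List Char) (n : Nat) (q : Char) : Nat → Nat → Nat
  | 0, i => i
  | fuel + 1, i =>
    if i < n then
      if l.getD i ' ' = '\\' then innerA l n q fuel (i + 2)
      else if l.getD i ' ' = q then i + 1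
      else innerA l n q fuel (i + 1)
    else i

-- A's second while loop: scan until a quote character or end of input.
def scanA (l : List Char) (n : Nat) : Nat → Nat → Nat
  | 0, i => i
  | fuel + 1, i =>
    if i < n then
      if l.getD i ' ' = '\'' ∨ l.getD i ' ' = '"' then i else scanA l n fuel (i + 1)
    else i

-- A's outer while loop over the whole source, slicing out each segment.
def outerA (l : List Char) (n : Nat) : Nat → Nat → List (Bool × String)
  | 0, _ => []
  | fuel + 1, i =>
    if i < n then
      if l.getD i ' ' = '\'' ∨ l.getD i ' ' = '"' then
        let j := innerA l n (l.getD i ' ') (n + 1) (i + 1)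
        (true, String.ofList ((l.take j).drop i)) :: outerA l n fuel j
      else
        let j := scanA l n (n + 1) i
        (false, String.ofList ((l.take j).drop i)) :: outerA l n fuel j
    else []

def split_strings (src : String) : List (Bool × String) :=
  outerA src.toList src.toList.length (src.toList.length + 1) 0

-- ===== PORT B =====
-- State of B's flat scan: st = 0 outside, 1 inside a string, 2 just after a backslash.
structure BSt where
  st : Nat
  q : Char
  buf : List Char
  parts : List (Bool × String)

def stepB (a : BSt) (ch : Char) : BSt :=
  if a.st = 0 then
    if ch = '\'' ∨ ch = '"' then
      { st := 1, q := ch, buf := [ch],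
        parts := if a.buf ≠ [] then a.parts ++ [(false, String.ofList a.buf)] else a.parts }
    else { a with buf := a.buf ++ [ch] }
  else if a.st = 1 then
    if ch = '\\' then { a with st := 2, buf := a.buf ++ [ch] }
    else if ch = a.q then
      { st := 0, q := a.q, buf := [], parts := a.parts ++ [(true, String.ofList (a.buf ++ [ch]))] }
    else { a with buf := a.buf ++ [ch] }
  else { a with st := 1, buf := a.buf ++ [ch] }

def finishB (a : BSt) : List (Bool × String) :=
  if a.buf ≠ [] then a.parts ++ [(decide (a.st ≠ 0), String.ofList a.buf)] else a.parts

def split_strings_alt (src : String) : List (Bool × String) :=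
  finishB (src.toList.foldl stepB ⟨0, ' ', [], []⟩)

-- ===== PRECONDITION & SPEC =====
def Spec_split_strings (src : String) (out : List (Bool × String)) : Prop := out = split_strings_alt src
instance (src : String) (out : List (Bool × String)) : Decidable (Spec_split_strings src out) := by unfold Spec_split_strings; infer_instance

-- ===== CLAIM (what is proved, stated in full; the proofs are below) =====
def Claim_equal_split_strings : Prop := ∀ (src : String), Dom_split_strings src → Spec_split_strings src (split_strings src)

-- ===== LEMMAS AND PROOFS =====
-- Reference (well-founded) versions of A's loops, used only by the proofs below.
def innerR (l : List Char) (n : Nat) (q : Char) (i : Nat) : Nat :=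
  if _h : i < n then
    if l.getD i ' ' = '\\' then innerR l n q (i + 2)
    else if l.getD i ' ' = q then i + 1
    else innerR l n q (i + 1)
  else i
termination_by n - i
decreasing_by all_goals omega

def scanR (l : List Char) (n : Nat) (i : Nat) : Nat :=
  if _h : i < n then
    if l.getD i ' ' = '\'' ∨ l.getD i ' ' = '"' then i else scanR l n (i + 1)
  else i
termination_by n - i
decreasing_by omega

theorem innerR_ge (l : List Char) (n : Nat) (q : Char) (i : Nat) : i ≤ innerR l n q i := by
  unfold innerR
  split
  · split
    · have := innerR_ge l n q (i + 2); omega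
    · split
      · omega
      · have := innerR_ge l n q (i + 1); omega
  · omega
termination_by n - i
decreasing_by all_goals omega

theorem scanR_ge (l : List Char) (n : Nat) (i : Nat) : i ≤ scanR l n i := by
  unfold scanR
  split
  · split
    · omega
    · have := scanR_ge l n (i + 1); omega
  · omega
termination_by n - i
decreasing_by omega

theorem scanR_step (l : List Char) (n : Nat) (i : Nat) (h : i < n)
    (hq : ¬(l.getD i ' ' = '\'' ∨ l.getD i ' ' = '"')) : scanR l n i = scanR l n (i + 1) := by
  rw [scanR, dif_pos h, if_neg hq]

def outerR (l : List Char) (n : Nat) (i : Nat) : List (Bool × String) :=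
  if h : i < n then
    if hq : l.getD i ' ' = '\'' ∨ l.getD i ' ' = '"' then
      (true, String.ofList ((l.take (innerR l n (l.getD i ' ') (i + 1))).drop i)) ::
        outerR l n (innerR l n (l.getD i ' ') (i + 1))
    else
      (false, String.ofList ((l.take (scanR l n i)).drop i)) :: outerR l n (scanR l n i)
  else []
termination_by n - i
decreasing_by
  · have := innerR_ge l n (l.getD i ' ') (i + 1); omega
  · have h1 := scanR_step l n i h hq
    have h2 := scanR_ge l n (i + 1)
    omega


-- The fuel versions agree with the references whenever the fuel exceeds the remaining length.
theorem innerA_eq (l : List Char) (n : Nat) (q : Char) :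
    ∀ fuel i, n - i < fuel → innerA l n q fuel i = innerR l n q i := by
  intro fuel
  induction fuel with
  | zero => intro i h; omega
  | succ fuel ih =>
    intro i h
    rw [innerR, innerA]
    by_cases hi : i < n
    · simp only [if_pos hi, dif_pos hi]
      split
      · exact ih (i + 2) (by omega)
      · split
        · rfl
        · exact ih (i + 1) (by omega)
    · simp [hi]

theorem scanA_eq (l : List Char) (n : Nat) :
    ∀ fuel i, n - i < fuel → scanA l n fuel i = scanR l n i := by
  intro fuel
  induction fuel with
  | zero => intro i h; omega
  | succ fuel ih =>
    intro i h
    rw [scanR, scanA]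
    by_cases hi : i < n
    · simp only [if_pos hi, dif_pos hi]
      split
      · rfl
      · exact ih (i + 1) (by omega)
    · simp [hi]

theorem outerA_eq (l : List Char) (n : Nat) :
    ∀ fuel i, n - i < fuel → outerA l n fuel i = outerR l n i := by
  intro fuel
  induction fuel with
  | zero => intro i h; omega
  | succ fuel ih =>
    intro i h
    rw [outerR, outerA]
    by_cases hi : i < n
    · simp only [if_pos hi, dif_pos hi]
      split
      · rw [innerA_eq l n _ (n + 1) (i + 1) (by omega)]
        have := innerR_ge l n (l.getD i ' ') (i + 1)
        rw [ih _ (by omega)]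
      · rw [scanA_eq l n (n + 1) i (by omega)]
        have h1 := scanR_step l n i hi (by assumption)
        have h2 := scanR_ge l n (i + 1)
        rw [ih _ (by omega)]
    · simp [hi]


-- Merge a still-pending non-string buffer into A's segment list.
def prepend (b : List Char) (res : List (Bool × String)) : List (Bool × String) :=
  match b, res with
  | [], _ => res
  | _, (false, s) :: rest => (false, String.ofList (b ++ s.toList)) :: rest
  | _, _ => (false, String.ofList b) :: res

theorem take_drop_cons (l : List Char) (i j : Nat) (hin : i < l.length) (hij : i < j) :
    (l.take j).drop i = l[i] :: (l.take j).drop (i + 1) := by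
  have hlen : i < (l.take j).length := by simp [List.length_take]; omega
  rw [List.drop_eq_getElem_cons hlen]
  congr 1
  exact List.getElem_take

theorem outerR_stop (l : List Char) (n i : Nat) (h : ¬ i < n) : outerR l n i = [] := by
  rw [outerR, dif_neg h]

theorem innerR_stop (l : List Char) (n : Nat) (q : Char) (i : Nat) (h : ¬ i < n) :
    innerR l n q i = i := by
  rw [innerR, dif_neg h]

theorem scanR_stop (l : List Char) (n i : Nat) (h : ¬ i < n) : scanR l n i = i := by
  rw [scanR, dif_neg h]

theorem getD_at (l : List Char) (i : Nat) (h : i < l.length) : l.getD i ' ' = l[i] := by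
  simp [List.getD, List.getElem?_eq_getElem h]

theorem take_drop_succ_self (l : List Char) (i : Nat) (hi : i < l.length) :
    (l.take (i + 1)).drop i = [l[i]] := by
  rw [take_drop_cons l i (i + 1) hi (by omega)]
  have h : (l.take (i + 1)).length ≤ i + 1 := by simp
  simp [List.drop_eq_nil_of_le h]

theorem drop_at_last (l : List Char) (i : Nat) (hi : i < l.length) (h : ¬ i + 1 < l.length) :
    l.drop i = [l[i]] := by
  rw [List.drop_eq_getElem_cons hi, List.drop_eq_nil_of_le (by omega)]

theorem main_terminal (l : List Char) (i : Nat) (h : l.length ≤ i) (q : Char)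
    (parts : List (Bool × String)) :
    (∀ b, finishB ((l.drop i).foldl stepB ⟨0, q, b, parts⟩) = parts ++ prepend b (outerR l l.length i))
    ∧ (∀ b, b ≠ [] → finishB ((l.drop i).foldl stepB ⟨1, q, b, parts⟩) =
        parts ++ (true, String.ofList (b ++ (l.take (innerR l l.length q i)).drop i)) ::
          outerR l l.length (innerR l l.length q i)) := by
  have hd : l.drop i = [] := List.drop_eq_nil_of_le h
  have ho : outerR l l.length i = [] := outerR_stop l l.length i (by omega)
  have hin : innerR l l.length q i = i := innerR_stop l l.length q i (by omega)
  have htd : (l.take i).drop i = [] := List.drop_eq_nil_of_le (by simp)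
  constructor
  · intro b
    cases b with
    | nil => simp [hd, finishB, ho, prepend]
    | cons x xs => simp [hd, finishB, ho, prepend]
  · intro b hb
    simp [hd, finishB, hb, ho, hin, htd]

theorem prepend_shift (l : List Char) (i : Nat) (hi : i < l.length)
    (hq : ¬(l[i] = '\'' ∨ l[i] = '"')) (b : List Char) :
    prepend (b ++ [l[i]]) (outerR l l.length (i + 1)) =
      prepend b ((false, String.ofList ((l.take (scanR l l.length i)).drop i)) ::
        outerR l l.length (scanR l l.length i)) := by
  have hj : scanR l l.length i = scanR l l.length (i + 1) := by
    refine scanR_step l l.length i hi ?_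
    rw [getD_at l i hi]; exact hq
  by_cases hi' : i + 1 < l.length
  · by_cases hq' : l[i+1] = '\'' ∨ l[i+1] = '"'
    · have hj2 : scanR l l.length (i + 1) = i + 1 := by
        rw [scanR, dif_pos hi', if_pos (by rw [getD_at l (i+1) hi']; exact hq')]
      have hseg : (l.take (scanR l l.length i)).drop i = [l[i]] := by
        rw [hj, hj2]; exact take_drop_succ_self l i hi
      have ho : outerR l l.length (i + 1) =
          (true, String.ofList ((l.take (innerR l l.length l[i+1] (i+2))).drop (i+1))) ::
            outerR l l.length (innerR l l.length l[i+1] (i+2)) := by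
        rw [outerR, dif_pos hi']
        rw [dif_pos (by rw [getD_at l (i+1) hi']; exact hq')]
        rw [getD_at l (i+1) hi']
      rw [hseg, hj, hj2, ho]
      cases b with
      | nil => simp [prepend]
      | cons x xs => simp [prepend]
    · have hq'' : ¬(l.getD (i+1) ' ' = '\'' ∨ l.getD (i+1) ' ' = '"') := by
        rw [getD_at l (i+1) hi']; exact hq'
      have ho : outerR l l.length (i + 1) =
          (false, String.ofList ((l.take (scanR l l.length (i+1))).drop (i+1))) ::
            outerR l l.length (scanR l l.length (i+1)) := by
        rw [outerR, dif_pos hi', dif_neg hq'']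
      have hgt : i < scanR l l.length (i + 1) := by
        have := scanR_ge l l.length (i + 1); omega
      have hseg : (l.take (scanR l l.length i)).drop i =
          l[i] :: (l.take (scanR l l.length (i+1))).drop (i + 1) := by
        rw [hj]; exact take_drop_cons l i _ hi hgt
      rw [ho, hseg, hj]
      cases b with
      | nil => simp [prepend]
      | cons x xs => simp [prepend]
  · have hj2 : scanR l l.length (i + 1) = i + 1 := scanR_stop l l.length (i + 1) hi'
    have ho : outerR l l.length (i + 1) = [] := outerR_stop l l.length (i + 1) hi'
    have hseg : (l.take (scanR l l.length i)).drop i = [l[i]] := by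
      rw [hj, hj2, List.take_of_length_le (by omega)]
      exact drop_at_last l i hi hi'
    rw [hseg, hj, hj2, ho]
    cases b with
    | nil => simp [prepend]
    | cons x xs => simp [prepend]

theorem main_invariant (l : List Char) (m : Nat) :
    ∀ i, l.length - i ≤ m → ∀ q parts,
      (∀ b, finishB ((l.drop i).foldl stepB ⟨0, q, b, parts⟩) = parts ++ prepend b (outerR l l.length i))
      ∧ (∀ b, b ≠ [] → finishB ((l.drop i).foldl stepB ⟨1, q, b, parts⟩) =
          parts ++ (true, String.ofList (b ++ (l.take (innerR l l.length q i)).drop i)) ::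
            outerR l l.length (innerR l l.length q i)) := by
  induction m with
  | zero =>
    intro i hm q parts
    exact main_terminal l i (by omega) q parts
  | succ m ih =>
    intro i hm q parts
    by_cases hi : i < l.length
    case neg => exact main_terminal l i (by omega) q parts
    have hgd : l.getD i ' ' = l[i] := getD_at l i hi
    have hdrop : l.drop i = l[i] :: l.drop (i + 1) := List.drop_eq_getElem_cons hi
    constructor
    · intro b
      rw [hdrop, List.foldl_cons]
      by_cases hq : l[i] = '\'' ∨ l[i] = '"'
      · have hstep : stepB ⟨0, q, b, parts⟩ l[i] =
            ⟨1, l[i], [l[i]], if b ≠ [] then parts ++ [(false, String.ofList b)] else parts⟩ := by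
          simp [stepB, hq]
        rw [hstep]
        have hih := (ih (i + 1) (by omega) l[i]
          (if b ≠ [] then parts ++ [(false, String.ofList b)] else parts)).2 [l[i]] (by simp)
        rw [hih]
        have ho : outerR l l.length i =
            (true, String.ofList ((l.take (innerR l l.length l[i] (i+1))).drop i)) ::
              outerR l l.length (innerR l l.length l[i] (i+1)) := by
          rw [outerR, dif_pos hi]
          rw [dif_pos (by rw [hgd]; exact hq)]
          rw [hgd]
        rw [ho]
        have hgt : i < innerR l l.length l[i] (i + 1) := by
          have := innerR_ge l l.length l[i] (i + 1); omega
        rw [take_drop_cons l i _ hi hgt]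
        cases b with
        | nil => simp [prepend]
        | cons x xs => simp [prepend]
      · have hstep : stepB ⟨0, q, b, parts⟩ l[i] = ⟨0, q, b ++ [l[i]], parts⟩ := by
          simp [stepB, hq]
        rw [hstep]
        have hih := (ih (i + 1) (by omega) q parts).1 (b ++ [l[i]])
        rw [hih]
        have ho : outerR l l.length i =
            (false, String.ofList ((l.take (scanR l l.length i)).drop i)) ::
              outerR l l.length (scanR l l.length i) := by
          rw [outerR, dif_pos hi, dif_neg (by rw [hgd]; exact hq)]
        rw [ho, prepend_shift l i hi hq b]
    · intro b hb
      rw [hdrop, List.foldl_cons]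
      by_cases hbs : l[i] = '\\'
      · have hin : innerR l l.length q i = innerR l l.length q (i + 2) := by
          rw [innerR, dif_pos hi, if_pos (by rw [hgd]; exact hbs)]
        have hstep : stepB ⟨1, q, b, parts⟩ l[i] = ⟨2, q, b ++ [l[i]], parts⟩ := by
          simp [stepB, hbs]
        rw [hstep]
        by_cases hi' : i + 1 < l.length
        · have hdrop2 : l.drop (i + 1) = l[i+1] :: l.drop (i + 2) :=
            List.drop_eq_getElem_cons hi'
          rw [hdrop2, List.foldl_cons]
          have hstep2 : stepB ⟨2, q, b ++ [l[i]], parts⟩ l[i+1] =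
              ⟨1, q, b ++ [l[i]] ++ [l[i+1]], parts⟩ := by
            simp [stepB]
          rw [hstep2]
          have hih := (ih (i + 2) (by omega) q parts).2 (b ++ [l[i]] ++ [l[i+1]]) (by simp)
          rw [hih]
          have hgt : i + 1 < innerR l l.length q (i + 2) := by
            have := innerR_ge l l.length q (i + 2); omega
          rw [hin, take_drop_cons l i _ hi (by omega), take_drop_cons l (i+1) _ hi' hgt]
          simp
        · have hdrop2 : l.drop (i + 1) = [] := List.drop_eq_nil_of_le (by omega)
          rw [hdrop2]
          have hin2 : innerR l l.length q (i + 2) = i + 2 :=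
            innerR_stop l l.length q (i + 2) (by omega)
          have hseg : (l.take (i + 2)).drop i = [l[i]] := by
            rw [List.take_of_length_le (by omega)]
            exact drop_at_last l i hi hi'
          rw [hin, hin2, hseg, outerR_stop l l.length (i + 2) (by omega)]
          simp [finishB, hb]
      · by_cases hqq : l[i] = q
        · have hin : innerR l l.length q i = i + 1 := by
            rw [innerR, dif_pos hi, if_neg (by rw [hgd]; exact hbs),
              if_pos (by rw [hgd]; exact hqq)]
          have hbq : ¬ q = '\\' := by rw [← hqq]; exact hbs
          have hstep : stepB ⟨1, q, b, parts⟩ l[i] =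
              ⟨0, q, [], parts ++ [(true, String.ofList (b ++ [l[i]]))]⟩ := by
            simp [stepB, hqq, hbq]
          rw [hstep]
          have hih := (ih (i + 1) (by omega) q
            (parts ++ [(true, String.ofList (b ++ [l[i]]))])).1 []
          rw [hih, hin, take_drop_succ_self l i hi]
          simp [prepend]
        · have hin : innerR l l.length q i = innerR l l.length q (i + 1) := by
            rw [innerR, dif_pos hi, if_neg (by rw [hgd]; exact hbs),
              if_neg (by rw [hgd]; exact hqq)]
          have hstep : stepB ⟨1, q, b, parts⟩ l[i] = ⟨1, q, b ++ [l[i]], parts⟩ := by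
            simp [stepB, hbs, hqq]
          rw [hstep]
          have hih := (ih (i + 1) (by omega) q parts).2 (b ++ [l[i]]) (by simp)
          rw [hih]
          have hgt : i < innerR l l.length q (i + 1) := by
            have := innerR_ge l l.length q (i + 1); omega
          rw [hin, take_drop_cons l i _ hi hgt]
          simp

theorem main_eq (src : String) : split_strings src = split_strings_alt src := by
  have h := (main_invariant src.toList src.toList.length 0 (by omega) ' ' []).1 []
  simp only [List.drop_zero] at h
  rw [split_strings, outerA_eq src.toList src.toList.length _ 0 (by omega)]
  simpa [split_strings_alt, prepend] using h.symm

-- ===== VERDICT (by name: the statement is the Claim_ definition above) =====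
theorem split_strings_spec : Claim_equal_split_strings := by
  intro src _
  unfold Spec_split_strings
  exact main_eq src
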